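/- GENERATED by tools/from_farm_form.py from prooffarm-gif/accepted/DGifOpen.P/Proof.lean (a worked proof of the farm's unit `DGifOpen.P`,
   accepted by the verdict) — do not edit. -/
import Gif.Spec.Units.DGifOpen_P
import Gif.Spec.AllSegs

open X86 X86.User Asan ProgX.Base ProgX.Base.Spec Gif.Spec

set_option maxRecDepth 4000
set_option maxHeartbeats 4000000

/-!
  `DGifOpen.P` (0x108680 … 0x1086d0, 17 instructions; dgif_lib.c:167): THE PROLOGUE OF THE PROTECTED FUNCTION `DGifOpen`.
  The form is that of farm.gif/worked/DGifGetWord.P, with ONE difference: there is NO FOREST at the entry of `DGifOpen`, so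
  `after_prologue` (which carries `GifOK`) does not apply. Its three parts are done one by one instead:
    * the heap's invariant: `HeapInv.sameExcept` over the stack stores, then `HeapInv.prologue_ra` over the two poison stores;
    * the cursor and the constants: `CursorOK.sameExcept` / `Consts.sameExcept` over the prologue's own footprint;
    * the reader's measure: `prologue_same_rem`.
  The blocks below:
    1. the prelude and the walk to the cut behind the last inline shadow store;
    2. `name_stores2`: the memory before the shadow stores gets the name `M0`;
    3. about `M0` (a nest of STACK stores over `e.mem`): the footprint `hsame0`, the six saved registers' slots;
    4. the environment behind the prologue (see above) and the two footprints (`prologue_same`);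
    5. the exit assertion `Body`, field by field.
-/

/-- The prologue of `DGifOpen` establishes `Body` at 0x1086d0 (before `malloc(120)`, dgif_lib.c:172). -/
theorem Gif.Spec.Proved.DGifOpen_P_ok : Gif.Spec.DGifOpen_P.Statement := by
  intro Lay hLay μ hμ u₀ hcode H rest frames R e ret he hpre
  -- 1. THE PRELUDE: the entry's facts (`he_align`, `he_room`, `he_top`, `he_retAddr`, `he_df`, `he_mx` …), the precondition
  have he0 := he
  v_entry he
  obtain ⟨hheap, hctx, hcursor, hconsts, hrdi, hrsi, herr⟩ := hpre
  -- THE WALK (0x108680 … 0x1086d0), to the cut behind the last inline shadow store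
  u_walk hcode [hμ.vendor] until [Gif.L.DGifOpen.at_1086d0] span [ProgX.Base.L.textLo, ProgX.Base.L.textHi] side (v_side)
  -- 2. NAMING THE MEMORY before the two shadow stores (0x1086b8, 0x1086c4)
  have e120 : (e.reg .rsp - 120).toNat = (e.reg .rsp).toNat - 120 := by u_omega
  obtain ⟨M0, hM0, hmem⟩ := name_stores2 (e.reg .rsp - 120) 12582912 12582916 0 4 4059165169 4 4 4092850951
    w_mem (by omega) (by decide) (by decide) (by decide) (by decide)
  have hpro : Gif.Frames.DGifOpen.prologue = [⟨0, 4, 4059165169⟩, ⟨4, 4, 4092850951⟩] := rfl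
  rw [← hpro, e120] at hmem
  -- 3. ABOUT `M0`: only stack stores over `e.mem` (six pushes, the frame's three header words)
  have hsame0 : Mem.SameExcept [⟨(e.reg .rsp).toNat - 528, (e.reg .rsp).toNat⟩] e.mem M0 := by
    rw [hM0]
    u_same
  have k_r15 : M0.readLE (e.reg .rsp - 8) 8 = (e.reg .r15).toNat := by
    rw [hM0]
    u_read
  have k_r14 : M0.readLE (e.reg .rsp - 16) 8 = (e.reg .r14).toNat := by
    rw [hM0]
    u_read
  have k_r13 : M0.readLE (e.reg .rsp - 24) 8 = (e.reg .r13).toNat := by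
    rw [hM0]
    u_read
  have k_r12 : M0.readLE (e.reg .rsp - 32) 8 = (e.reg .r12).toNat := by
    rw [hM0]
    u_read
  have k_rbp : M0.readLE (e.reg .rsp - 40) 8 = (e.reg .rbp).toNat := by
    rw [hM0]
    u_read
  have k_rbx : M0.readLE (e.reg .rsp - 48) 8 = (e.reg .rbx).toNat := by
    rw [hM0]
    u_read
  clear hM0 w_mem
  -- 4. THE ENVIRONMENT behind the prologue. There is no forest yet: the three parts of `after_prologue`, one by one.
  -- where the cursor is: a stack object of a caller, at or above the return-address slot's end
  have hcur := hctx.cursor_range hheap.inv.shadow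
  have hoff := hheap.inv.heap.offStack
  have hroom := hheap.inv.heap.room
  -- the stack stores wrote no shadow byte …
  have hun : ShadowUntouched e.mem M0 := by
    apply hsame0.eqOn
    intro w hw
    have ew := List.mem_singleton.mp hw
    rw [ew]
    simp only
    omega
  -- … and nothing of the heap: its invariant holds in `M0`
  have hinv0 : HeapInv H rest frames ((e.reg .rsp).toNat + 8) M0 := by
    apply hheap.inv.sameExcept hun hsame0
    intro w hw
    have ew := List.mem_singleton.mp hw
    rw [ew]
    left
    simp only
    omega
  -- the two poison stores push the own frame
  have hinv1 : HeapInv H rest (((e.reg .rsp).toNat - 120, Gif.Frames.DGifOpen) :: frames) ((e.reg .rsp).toNat - 120)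
      (storesMem M0 (((e.reg .rsp).toNat - 120) / 8) Gif.Frames.DGifOpen.prologue) :=
    hinv0.prologue_ra Gif.Frames.DGifOpen_ok he_align (Nat.le_refl _) (by omega) (by omega)
  -- the prologue's own footprint, and the same in front of the contract's windows (`Core.same`)
  have hsame1 := prologue_same (top := (e.reg .rsp).toNat) (Fl := Gif.Frames.DGifOpen) Gif.Frames.DGifOpen_ok
    (ro := 120) (ro' := 56) rfl rfl he_align (by omega) (by omega) hsame0 []
  have hsame2 := prologue_same (top := (e.reg .rsp).toNat) (Fl := Gif.Frames.DGifOpen) Gif.Frames.DGifOpen_ok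
    (ro := 120) (ro' := 56) rfl rfl he_align (by omega) (by omega) hsame0
    [⟨0x800000, 0x1000020⟩, ⟨(e.reg .rdx).toNat, (e.reg .rdx).toNat + 4⟩, ⟨R.cur, R.cur + 8⟩]
  -- the reader is where it was
  have hrem1 := prologue_same_rem (R := R) hsame1 (by omega) hcur.2.1
  -- the cursor's two fields and the image's constants lie off the stack window and off the shadow
  have hcursor1 : CursorOK R (storesMem M0 (((e.reg .rsp).toNat - 120) / 8) Gif.Frames.DGifOpen.prologue) := by
    apply hcursor.sameExcept hsame1 (by omega)
    intro w hw
    simp only [List.mem_cons, List.mem_nil_iff, or_false] at hw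
    rcases hw with ew | ew
    · rw [ew]
      left
      simp only
      omega
    · rw [ew]
      right
      unfold shadowSpan
      simp only
      omega
  have hconsts1 : Consts (storesMem M0 (((e.reg .rsp).toNat - 120) / 8) Gif.Frames.DGifOpen.prologue) := by
    apply hconsts.sameExcept hsame1
    intro w hw
    simp only [List.mem_cons, List.mem_nil_iff, or_false] at hw
    rcases hw with ew | ew
    · rw [ew]
      right
      simp only
      omega
    · rw [ew]
      right
      unfold shadowSpan
      simp only
      omega
  have hin : ∀ s, s ∈ Gif.Frames.DGifOpen.prologue → s.idx + s.width ≤ 8 := by decide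
  rw [← hmem] at hinv1 hrem1 hcursor1 hconsts1 hsame1 hsame2
  -- 5. THE EXIT ASSERTION: `Core` at 0x1086d0 …
  have hcore : DGifOpen.Core Gif.L.DGifOpen.at_1086d0 H rest frames R u₀ e ret s_1086c4 := {
    entry := he0
    pre := ⟨hheap, hctx, hcursor, hconsts, hrdi, hrsi, herr⟩
    rip := w_rip
    rsp := w_rsp
    r12 := w_r12
    -- a slot is read THROUGH the shadow stores (`readLE_storesMem`), then in `M0`
    slot_r15 := by
      rw [hmem, readLE_storesMem M0 _ 8 _ hin (by omega) _ _ (by u_omega)]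
      exact k_r15
    slot_r14 := by
      rw [hmem, readLE_storesMem M0 _ 8 _ hin (by omega) _ _ (by u_omega)]
      exact k_r14
    slot_r13 := by
      rw [hmem, readLE_storesMem M0 _ 8 _ hin (by omega) _ _ (by u_omega)]
      exact k_r13
    slot_r12 := by
      rw [hmem, readLE_storesMem M0 _ 8 _ hin (by omega) _ _ (by u_omega)]
      exact k_r12
    slot_rbp := by
      rw [hmem, readLE_storesMem M0 _ 8 _ hin (by omega) _ _ (by u_omega)]
      exact k_rbp
    slot_rbx := by
      rw [hmem, readLE_storesMem M0 _ 8 _ hin (by omega) _ _ (by u_omega)]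
      exact k_rbx
    -- the return address: the prologue's footprint ends below its slot
    slot_ra := by
      rw [prologue_same_readLE hsame1 (e.reg .rsp) 8 (Nat.le_refl _) (by omega)]
      exact he_retAddr
    rem := Nat.le_of_eq hrem1
    same := hsame2
    code := ProgX.Base.conv_code_in w_eq
    -- DF and MXCSR by hand (`v_inv` is slow behind a walk with shadow stores)
    abi := by
      refine ProgX.Base.abiInv_of ?_ ?_
      · rw [w_flags]
        simp only [X86.User.df_setStatus]
        exact he_df
      · rw [w_mxcsr]
        exact he_mx
  }
  -- … and `Body`: the three arguments in `r13 r14 r15`, the heap's invariant with the own frame, the cursor, the constants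
  refine ReachVia.done ?_
  exact {
    core := hcore
    r13 := w_r13
    r14 := w_r14
    r15 := w_r15
    inv := hinv1
    cursor := hcursor1
    consts := hconsts1
  }
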